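-- pv_equiv track=rewrite | github.com/Juanje24/PracticasALF | main.py | y_vocal
-- ===== SOURCE A (Python) =====
-- def y_vocal(cadena):
--     i = 0
--     while i < len(cadena):
--         if cadena[i] == 'y' and (i == len(cadena) - 1 or cadena[i + 1] not in ['a', 'e', 'i', 'o', 'u']):
--             cadena = cadena[:i] + 'ç' + cadena[i+1:]
--             i += 2
--         else:
--             i += 1
--     return cadena
-- ===== SOURCE B (Python) =====
-- def y_vocal(cadena):
--     out = []
--     skip = False
--     for i, c in enumerate(cadena):
--         if skip:
--             out.append(c)
--             skip = False
--         elif c == 'y' and cadena[i+1:i+2] not in ('a', 'e', 'i', 'o', 'u'):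
--             out.append('ç')
--             skip = True
--         else:
--             out.append(c)
--     return ''.join(out)
-- ===== Notes on version B (the rewrite author's own statement) =====
-- stated objective: faster
-- what changed: A's index-jumping while loop that rebuilds the whole string at every replacement is replaced by a single forward pass over enumerate(cadena) with a skip flag appending to an output list, joined once at the end.
import Mathlib
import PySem

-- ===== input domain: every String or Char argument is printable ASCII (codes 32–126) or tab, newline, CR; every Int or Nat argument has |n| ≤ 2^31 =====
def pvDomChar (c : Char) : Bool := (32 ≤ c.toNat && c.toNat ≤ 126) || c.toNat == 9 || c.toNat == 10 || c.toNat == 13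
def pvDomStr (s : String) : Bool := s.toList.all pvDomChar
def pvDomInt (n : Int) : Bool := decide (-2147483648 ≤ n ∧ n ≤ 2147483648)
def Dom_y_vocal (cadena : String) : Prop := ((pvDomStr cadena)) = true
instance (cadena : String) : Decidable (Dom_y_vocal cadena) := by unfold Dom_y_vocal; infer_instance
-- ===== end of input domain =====

-- B replaces A's index-jumping while loop that rebuilds the whole string at each replacement
-- by a single forward pass with a skip flag appending to an output buffer (simpler/faster, same values).

-- ===== PORT A =====
-- length is preserved by A's replacement step (cited by yLoopA's decreasing_by)
theorem yLoopA_len (cadena : List Char) (i : Nat) (h : i < cadena.length) :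
    (PySem.List.slice cadena none (some (i : Int)) ++ 'ç' ::
      PySem.List.slice cadena (some ((i : Int) + 1)) none).length = cadena.length := by
  have h1 : ((i : Int) + 1) = ((i + 1 : Nat) : Int) := by push_cast; ring
  rw [h1, PySem.List.slice_to_natCast, PySem.List.slice_from_natCast]
  simp
  omega

-- A's while loop: state is the (mutated) string and the index i; i advances by 2 after a replacement.
def yLoopA (cadena : List Char) (i : Nat) : List Char :=
  if _h : i < cadena.length then
    if PySem.List.pyGetD cadena (i : Int) ' ' = 'y' ∧
        (i = cadena.length - 1 ∨
          PySem.List.pyGetD cadena ((i : Int) + 1) ' ' ∉ (['a', 'e', 'i', 'o', 'u'] : List Char)) then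
      yLoopA (PySem.List.slice cadena none (some (i : Int)) ++ 'ç' ::
                PySem.List.slice cadena (some ((i : Int) + 1)) none) (i + 2)
    else
      yLoopA cadena (i + 1)
  else cadena
termination_by cadena.length - i
decreasing_by
  · rw [yLoopA_len cadena i _h]; omega
  · omega

def y_vocal (cadena : String) : String := String.ofList (yLoopA cadena.toList 0)

-- ===== PORT B =====
-- B's single pass: fold over enumerate(cadena) with an output buffer and a skip flag.
def yStepB (cadena : List Char) (acc : List Char × Bool) (ic : Int × Char) : List Char × Bool :=
  if acc.2 then (acc.1 ++ [ic.2], false)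
  else if ic.2 = 'y' ∧
      PySem.List.slice cadena (some (ic.1 + 1)) (some (ic.1 + 2)) ∉
        ([['a'], ['e'], ['i'], ['o'], ['u']] : List (List Char)) then
    (acc.1 ++ ['ç'], true)
  else (acc.1 ++ [ic.2], false)

def y_vocal_alt (cadena : String) : String :=
  String.ofList ((PySem.List.enumerate cadena.toList 0).foldl (yStepB cadena.toList) ([], false)).1

-- ===== PRECONDITION & SPEC =====
def Spec_y_vocal (cadena : String) (out : String) : Prop := out = y_vocal_alt cadena
instance (cadena : String) (out : String) : Decidable (Spec_y_vocal cadena out) := by unfold Spec_y_vocal; infer_instance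

-- ===== CLAIM (what is proved, stated in full; the proofs are below) =====
def Claim_equal_y_vocal : Prop := ∀ (cadena : String), Dom_y_vocal cadena → Spec_y_vocal cadena (y_vocal cadena)

-- ===== LEMMAS AND PROOFS =====

-- canonical recursion both ports are reduced to
def yGo : List Char → List Char
  | [] => []
  | c :: cs =>
    if c = 'y' then
      match cs with
      | [] => ['ç']
      | d :: rest => if d ∈ (['a', 'e', 'i', 'o', 'u'] : List Char) then c :: yGo (d :: rest)
                     else 'ç' :: d :: yGo rest
    else c :: yGo cs

theorem yLoopA_eq (n : Nat) : ∀ rest : List Char, rest.length ≤ n → ∀ done : List Char,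
    yLoopA (done ++ rest) done.length = done ++ yGo rest := by
  induction n with
  | zero =>
    intro rest h done
    have hr : rest = [] := List.eq_nil_of_length_eq_zero (by omega)
    subst hr
    rw [yLoopA]
    simp [yGo]
  | succ n ih =>
    intro rest h done
    match rest with
    | [] => rw [yLoopA]; simp [yGo]
    | [c] =>
      rw [yLoopA]
      have hget0 : PySem.List.pyGetD (done ++ [c]) ((done.length : Nat) : Int) ' ' = c := by
        rw [PySem.List.pyGetD_natCast, List.getD_eq_getElem?_getD,
          List.getElem?_append_right le_rfl]
        simp
      simp only [hget0]
      rw [dif_pos (by simp)]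
      by_cases hc : c = 'y'
      · rw [if_pos ⟨hc, Or.inl (by simp)⟩]
        have hc1 : ((done.length : Int) + 1) = ((done.length + 1 : Nat) : Int) := by push_cast; ring
        rw [hc1, PySem.List.slice_to_natCast, PySem.List.slice_from_natCast]
        have hd : List.drop (done.length + 1) (done ++ [c]) = [] := by
          rw [show done.length + 1 = done.length + 1 from rfl]
          simp
        rw [List.take_left, hd]
        rw [yLoopA]
        simp [yGo, hc]
      · rw [if_neg (by rintro ⟨h1, -⟩; exact hc h1)]
        have := ih [] (by simp) (done ++ [c])
        simpa [yGo, hc] using this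
    | c :: d :: rest' =>
      rw [yLoopA]
      have hget0 : PySem.List.pyGetD (done ++ c :: d :: rest') ((done.length : Nat) : Int) ' ' = c := by
        rw [PySem.List.pyGetD_natCast, List.getD_eq_getElem?_getD,
          List.getElem?_append_right le_rfl]
        simp
      have hc1 : ((done.length : Int) + 1) = ((done.length + 1 : Nat) : Int) := by push_cast; ring
      have hget1 : PySem.List.pyGetD (done ++ c :: d :: rest') ((done.length : Int) + 1) ' ' = d := by
        rw [hc1, PySem.List.pyGetD_natCast, List.getD_eq_getElem?_getD,
          List.getElem?_append_right (by omega)]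
        simp
      simp only [hget0, hget1]
      rw [dif_pos (by simp)]
      have hne : ¬ (done.length = (done ++ c :: d :: rest').length - 1) := by simp
      by_cases hcond : c = 'y' ∧ d ∉ (['a', 'e', 'i', 'o', 'u'] : List Char)
      · rw [if_pos ⟨hcond.1, Or.inr hcond.2⟩]
        rw [hc1, PySem.List.slice_to_natCast, PySem.List.slice_from_natCast,
          List.take_left]
        have hd : List.drop (done.length + 1) (done ++ c :: d :: rest') = d :: rest' := by
          rw [show done.length + 1 = done.length + 1 from rfl]
          simp
        rw [hd]
        have hre : done ++ 'ç' :: d :: rest' = (done ++ ['ç', d]) ++ rest' := by simp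
        have hlen2 : done.length + 2 = (done ++ ['ç', d]).length := by simp
        rw [hre, hlen2, ih rest' (by simp at h; omega) (done ++ ['ç', d])]
        simp [yGo, hcond.1, hcond.2]
      · rw [if_neg (by rintro ⟨h1, h2⟩; rcases h2 with h2 | h2; exacts [hne h2, hcond ⟨h1, h2⟩])]
        have hre : done ++ c :: d :: rest' = (done ++ [c]) ++ d :: rest' := by simp
        have hlen2 : done.length + 1 = (done ++ [c]).length := by simp
        rw [hre, hlen2, ih (d :: rest') (by simp at h ⊢; omega) (done ++ [c])]
        by_cases hc : c = 'y'
        · have hdv : d ∈ (['a', 'e', 'i', 'o', 'u'] : List Char) := by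
            by_contra hdv; exact hcond ⟨hc, hdv⟩
          simp [yGo, hc, hdv]
        · simp [yGo, hc]

theorem foldB_eq (n : Nat) : ∀ rest : List Char, rest.length ≤ n → ∀ (s : List Char) (i : Nat),
    s.drop i = rest → ∀ acc : List Char,
    ((PySem.List.enumerate rest (i : Int)).foldl (yStepB s) (acc, false)).1 = acc ++ yGo rest := by
  induction n with
  | zero =>
    intro rest h s i hdrop acc
    have hr : rest = [] := List.eq_nil_of_length_eq_zero (by omega)
    subst hr
    simp [PySem.List.enumerate, yGo]
  | succ n ih =>
    intro rest h s i hdrop acc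
    match rest with
    | [] => simp [PySem.List.enumerate, yGo]
    | c :: cs =>
      rw [PySem.List.enumerate_cons, List.foldl_cons]
      have hdrop1 : s.drop (i + 1) = cs := by
        have h' := congrArg (List.drop 1) hdrop
        rwa [List.drop_drop, List.drop_one, List.tail_cons] at h'
      have hsl : PySem.List.slice s (some ((i : Int) + 1)) (some ((i : Int) + 2)) = cs.take 1 := by
        rw [show ((i : Int) + 1) = ((i + 1 : Nat) : Int) by push_cast; ring,
          show ((i : Int) + 2) = ((i + 2 : Nat) : Int) by push_cast; ring,
          PySem.List.slice_natCast, hdrop1, show i + 2 - (i + 1) = 1 by omega]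
      match cs with
      | [] =>
        by_cases hc : c = 'y'
        · have hstep : yStepB s (acc, false) ((i : Int), c) = (acc ++ ['ç'], true) := by
            rw [yStepB]
            simp only [hsl]
            rw [if_neg (by simp), if_pos ⟨hc, by simp⟩]
          rw [hstep]
          simp [PySem.List.enumerate, yGo, hc]
        · have hstep : yStepB s (acc, false) ((i : Int), c) = (acc ++ [c], false) := by
            rw [yStepB]
            simp only [hsl]
            rw [if_neg (by simp), if_neg (by rintro ⟨h1, -⟩; exact hc h1)]
          rw [hstep]
          simp [PySem.List.enumerate, yGo, hc]
      | d :: rest' =>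
        have hdm : PySem.List.slice s (some ((i : Int) + 1)) (some ((i : Int) + 2)) ∈
            ([['a'], ['e'], ['i'], ['o'], ['u']] : List (List Char)) ↔
            d ∈ (['a', 'e', 'i', 'o', 'u'] : List Char) := by
          rw [hsl]; simp
        have hdrop2 : s.drop (i + 2) = rest' := by
          have h' := congrArg (List.drop 1) hdrop1
          rwa [List.drop_drop, List.drop_one, List.tail_cons] at h'
        by_cases hcond : c = 'y' ∧ d ∉ (['a', 'e', 'i', 'o', 'u'] : List Char)
        · have hstep : yStepB s (acc, false) ((i : Int), c) = (acc ++ ['ç'], true) := by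
            rw [yStepB]
            rw [if_neg (by simp), if_pos ⟨hcond.1, fun hm => hcond.2 (hdm.mp hm)⟩]
          rw [hstep, PySem.List.enumerate_cons, List.foldl_cons]
          have hstep2 : yStepB s (acc ++ ['ç'], true) ((i : Int) + 1, d) = ((acc ++ ['ç']) ++ [d], false) := by
            rw [yStepB]
            simp
          have hca : ((i : Int) + 1) + 1 = (((i + 2 : Nat)) : Int) := by push_cast; ring
          rw [hstep2, show (acc ++ ['ç']) ++ [d] = (acc ++ ['ç', d]) by simp, hca,
            ih rest' (by simp at h; omega) s (i + 2) hdrop2 (acc ++ ['ç', d])]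
          simp [yGo, hcond.1, hcond.2]
        · have hstep : yStepB s (acc, false) ((i : Int), c) = (acc ++ [c], false) := by
            rw [yStepB]
            rw [if_neg (by simp), if_neg (by rintro ⟨h1, h2⟩; exact hcond ⟨h1, fun hv => h2 (hdm.mpr hv)⟩)]
          rw [hstep, show ((i : Int) + 1) = ((i + 1 : Nat) : Int) by push_cast; ring,
            ih (d :: rest') (by simp at h ⊢; omega) s (i + 1) hdrop1 (acc ++ [c])]
          by_cases hc : c = 'y'
          · have hdv : d ∈ (['a', 'e', 'i', 'o', 'u'] : List Char) := by
              by_contra hdv; exact hcond ⟨hc, hdv⟩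
            simp [yGo, hc, hdv]
          · simp [yGo, hc]

-- ===== VERDICT (by name: the statement is the Claim_ definition above) =====
theorem y_vocal_spec : Claim_equal_y_vocal := by
  intro cadena _
  unfold Spec_y_vocal y_vocal y_vocal_alt
  have hA := yLoopA_eq cadena.toList.length cadena.toList le_rfl []
  have hB := foldB_eq cadena.toList.length cadena.toList le_rfl cadena.toList 0 (by simp) []
  simp only [List.nil_append, List.length_nil, Nat.cast_zero] at hA hB
  rw [hA, hB]
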